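-- pv_equiv track=rewrite | github.com/mr-/aoc_2023 | src/day13/2.py | horizontal_mirrorss
-- ===== SOURCE A (Python) =====
-- def horizontal_mirrorss(block):
--     for x in range(1, len(block[0])):
--         mirrors = True
--         for y in range(0, len(block)):
--             left = block[y][:x]
--             right = block[y][x:]
--             if any(a != b for a,b in zip(reversed(left), right)):
--                 mirrors = False
--         if mirrors:
--             yield x
-- ===== SOURCE B (Python) =====
-- def _mirrors_at(row, x):
--     k = min(x, len(row) - x)
--     return row[x - k:x] == row[x:x + k][::-1]
--
--
-- def horizontal_mirrorss(block):
--     candidates = list(range(1, len(block[0])))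
--     for row in block:
--         candidates = [x for x in candidates if _mirrors_at(row, x)]
--     return candidates
-- ===== Notes on version B (the rewrite author's own statement) =====
-- stated objective: faster
-- what changed: B inverts the loop nesting: instead of testing every mirror position x against all rows with a per-row character-by-character reversed-zip scan, B keeps a shrinking list of candidate positions and filters it row by row with one slice comparison per surviving (row, x) pair.
import Mathlib
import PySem

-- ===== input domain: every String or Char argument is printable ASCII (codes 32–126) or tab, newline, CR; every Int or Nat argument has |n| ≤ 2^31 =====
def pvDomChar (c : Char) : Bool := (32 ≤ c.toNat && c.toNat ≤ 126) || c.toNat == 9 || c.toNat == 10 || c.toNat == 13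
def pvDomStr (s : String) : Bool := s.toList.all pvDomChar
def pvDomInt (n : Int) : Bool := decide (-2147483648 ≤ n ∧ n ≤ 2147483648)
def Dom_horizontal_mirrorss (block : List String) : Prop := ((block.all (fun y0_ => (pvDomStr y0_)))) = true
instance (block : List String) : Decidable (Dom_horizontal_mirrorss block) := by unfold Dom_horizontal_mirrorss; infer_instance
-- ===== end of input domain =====

-- B inverts the loop nesting (row-wise filtering of a candidate list with one slice
-- comparison per surviving pair, instead of per-x reversed-zip scans over all rows); measurably faster by constant factor.

-- ===== PORT A =====
-- inner 'if any(a != b for a,b in zip(reversed(left), right)): mirrors = False'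
def pvFailA (row : String) (x : Int) : Bool :=
  let left := PySem.Chars.slice row.toList none (some x)
  let right := PySem.Chars.slice row.toList (some x) none
  (left.reverse.zip right).any (fun p => p.1 != p.2)

def horizontal_mirrorss (block : List String) : List Int :=
  match PySem.List.pyGet? block 0 with
  | none => []   -- block[0] raises IndexError; excluded by Pre_
  | some r0 =>
    (PySem.List.pyRange 1 (PySem.Str.len r0) 1).foldl (fun acc x =>
      let mirrors := (PySem.List.pyRange 0 (block.length : Int) 1).foldl (fun m y =>
        if pvFailA (PySem.List.pyGetD block y "") x then false else m) true
      if mirrors then acc ++ [x] else acc) []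

-- ===== PORT B =====
def pvMirrorsAt (row : String) (x : Int) : Bool :=
  let k := min x (PySem.Str.len row - x)
  PySem.Chars.slice row.toList (some (x - k)) (some x)
    == (PySem.Chars.slice row.toList (some x) (some (x + k))).reverse

def horizontal_mirrorss_alt (block : List String) : List Int :=
  match PySem.List.pyGet? block 0 with
  | none => []   -- list(range(1, len(block[0]))) raises IndexError; excluded by Pre_
  | some r0 =>
    block.foldl (fun cand row => cand.filter (fun x => pvMirrorsAt row x))
      (PySem.List.pyRange 1 (PySem.Str.len r0) 1)

-- ===== PRECONDITION & SPEC =====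
-- both programs raise IndexError on the empty block (block[0])
def Pre_horizontal_mirrorss (block : List String) : Prop := block ≠ []
instance (block : List String) : Decidable (Pre_horizontal_mirrorss block) := by
  unfold Pre_horizontal_mirrorss; infer_instance

def pvWitness_horizontal_mirrorss : List String := ["#..#", "#..#"]

def Spec_horizontal_mirrorss (block : List String) (out : List Int) : Prop := out = horizontal_mirrorss_alt block
instance (block : List String) (out : List Int) : Decidable (Spec_horizontal_mirrorss block out) := by unfold Spec_horizontal_mirrorss; infer_instance

-- ===== CLAIM (what is proved, stated in full; the proofs are below) =====
def Claim_equal_horizontal_mirrorss : Prop := ∀ (block : List String), Dom_horizontal_mirrorss block → Pre_horizontal_mirrorss block → Spec_horizontal_mirrorss block (horizontal_mirrorss block)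

-- ===== LEMMAS AND PROOFS =====

-- zip-all-equal equals truncated-prefix equality
theorem pv_zip_any_ne (u v : List Char) :
    ((u.zip v).any (fun p => p.1 != p.2) = false) ↔ u.take v.length = v.take u.length := by
  induction u generalizing v with
  | nil => simp
  | cons a u ih =>
    cases v with
    | nil => simp
    | cons b v =>
      simp only [List.zip_cons_cons, List.any_cons, Bool.or_eq_false_iff, List.length_cons,
        List.take_succ_cons, List.cons.injEq, bne_eq_false_iff_eq]
      rw [ih]

-- A's inner flag fold is an 'all' over rows
theorem pv_flag_fold (rows : List String) (x : Int) (b : Bool) :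
    rows.foldl (fun m row => if pvFailA row x then false else m) b
      = (b && rows.all (fun row => ! pvFailA row x)) := by
  induction rows generalizing b with
  | nil => simp
  | cons r rows ih =>
    simp only [List.foldl_cons, List.all_cons, ih]
    cases h : pvFailA r x <;> simp [h]

-- A's inner loop over row indices, bridged to a fold over the rows
theorem pv_inner (block : List String) (x : Int) :
    (PySem.List.pyRange 0 (block.length : Int) 1).foldl
        (fun m y => if pvFailA (PySem.List.pyGetD block y "") x then false else m) true
      = block.all (fun row => ! pvFailA row x) := by
  rw [PySem.List.foldl_pyRange_zero_pyGetD' block "" (fun m row => if pvFailA row x then false else m) true]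
  rw [pv_flag_fold]
  simp

-- B's row loop is a single filter by 'all rows mirror'
theorem pv_foldl_filter (rows : List String) (init : List Int) :
    rows.foldl (fun cand row => cand.filter (fun x => pvMirrorsAt row x)) init
      = init.filter (fun x => rows.all (fun row => pvMirrorsAt row x)) := by
  induction rows generalizing init with
  | nil => simp
  | cons r rows ih =>
    simp only [List.foldl_cons, ih, List.filter_filter, List.all_cons]
    exact List.filter_congr (fun x _ => by cases h : pvMirrorsAt r x <;> simp [h])

-- per-row, per-position agreement of the two tests (for x ≥ 1)
theorem pv_row_eq (row : String) (x : Int) (hx : 1 ≤ x) :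
    (! pvFailA row x) = pvMirrorsAt row x := by
  unfold pvFailA pvMirrorsAt
  simp only [PySem.Chars.slice_eq_listSlice, PySem.Str.len_eq]
  set l := row.toList with hl
  have hx0 : (0:Int) ≤ x := by omega
  rw [PySem.List.slice_to l hx0, PySem.List.slice_from l hx0]
  set n := x.toNat with hn
  set m := l.length with hm
  by_cases hmx : (m : Int) ≤ x
  · -- degenerate: x at or past the row's end; both tests trivially succeed
    have hk : min x ((m:Int) - x) = (m:Int) - x := by omega
    have hdrop : l.drop n = [] := by
      apply List.drop_eq_nil_of_le; omega
    have h1 : PySem.List.slice l (some (x - min x ((m:Int) - x))) (some x) = [] := by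
      rw [hk, PySem.List.slice_toNat l (by omega) hx0]
      have : x.toNat - (x - ((m:Int) - x)).toNat = 0 := by omega
      simp [this]
    have h2 : PySem.List.slice l (some x) (some (x + min x ((m:Int) - x))) = [] := by
      rw [hk]
      have he : x + ((m:Int) - x) = (m:Int) := by ring
      rw [he, PySem.List.slice_toNat l hx0 (by omega)]
      simp
      omega
    rw [h1, h2, hdrop]
    simp
  · -- real case: 1 ≤ x < length of the row
    have hxm : x < (m:Int) := by omega
    set k := min n (m - n) with hkdef
    have hk : min x ((m:Int) - x) = ((k : Nat) : Int) := by omega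
    have hkx : x - ((k:Nat):Int) = ((n - k : Nat) : Int) := by omega
    have hxk : x + ((k:Nat):Int) = ((n + k : Nat) : Int) := by omega
    have e0 : x = ((n:Nat):Int) := by omega
    rw [hk, hkx, hxk, e0, PySem.List.slice_natCast, PySem.List.slice_natCast]
    have e1 : n - (n - k) = k := by omega
    have e2 : n + k - n = k := by omega
    rw [e1, e2]
    rw [Bool.eq_iff_iff]
    simp only [Bool.not_eq_true', beq_iff_eq]
    rw [pv_zip_any_ne]
    have hL : (l.take n).reverse.length = n := by
      rw [List.length_reverse, List.length_take]; omega
    have hD : (l.drop n).length = m - n := by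
      rw [List.length_drop]
    rw [hL, hD]
    have s1 : (l.take n).reverse.take (m - n) = (l.take n).reverse.take k := by
      rw [List.take_eq_take_iff, hL]; omega
    have s2 : (l.drop n).take n = (l.drop n).take k := by
      rw [List.take_eq_take_iff, hD]; omega
    have hlt : (l.take n).length = n := by
      rw [List.length_take]; omega
    have s3 : (l.take n).reverse.take k = ((l.drop (n - k)).take k).reverse := by
      rw [List.take_reverse, hlt, List.drop_take, e1]
    rw [s1, s2, s3, List.reverse_eq_iff]

-- ===== VERDICT (by name: the statement is the Claim_ definition above) =====
theorem horizontal_mirrorss_spec : Claim_equal_horizontal_mirrorss := by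
  intro block _ hpre
  unfold Spec_horizontal_mirrorss horizontal_mirrorss horizontal_mirrorss_alt
  cases block with
  | nil => exact absurd rfl hpre
  | cons r0 rest =>
    have hget : PySem.List.pyGet? (r0 :: rest) 0 = some r0 := by
      simp [PySem.List.pyGet?, PySem.List.pyIdx?]
    rw [hget]
    simp only [pv_inner]
    rw [PySem.List.foldl_append_if_eq_filter
      (fun x => (r0 :: rest).all (fun row => ! pvFailA row x)) _ []]
    rw [pv_foldl_filter]
    simp only [List.nil_append]
    apply List.filter_congr
    intro x hxmem
    have hx : 1 ≤ x := ((PySem.List.mem_pyRange_one).mp hxmem).1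
    have : (fun row => ! pvFailA row x) = (fun row => pvMirrorsAt row x) := by
      funext row; exact pv_row_eq row x hx
    rw [this]
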